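-- pv_equiv track=rewrite | github.com/ImGeuntae/CodingTest | 프로그래머스/3/92344. 파괴되지 않은 건물/파괴되지 않은 건물.py | solution
-- ===== SOURCE A (Python) =====
-- def solution(board, skill):
--     m, n = len(board), len(board[0])
--     X = [[0]*(n+1) for _ in range(m+1)]
--     for [t, r1, c1, r2, c2, d] in skill:
--         d = d*([-1,1][t-1])
--         X[r1][c1] += d
--         X[r1][c2+1] -= d
--         X[r2+1][c1] -= d
--         X[r2+1][c2+1] += d
--     for j in range(m+1):
--         for i in range(1,n+1):
--             X[j][i] += X[j][i-1]
--     for i in range(n+1):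
--         for j in range(1,m+1):
--             X[j][i] += X[j-1][i]
--     return sum([1 if 0 < board[x][y] + X[x][y] else 0 for x in range(m) for y in range(n)])
-- ===== SOURCE B (Python) =====
-- def solution(board, skill):
--     m, n = len(board), len(board[0])
--     count = 0
--     for x in range(m):
--         for y in range(n):
--             h = board[x][y]
--             for t, r1, c1, r2, c2, d in skill:
--                 if r1 <= x <= r2 and c1 <= y <= c2:
--                     h += -d if t == 1 else d
--             if h > 0:
--                 count += 1
--     return count
-- ===== Notes on version B (the rewrite author's own statement) =====
-- stated objective: alternative
-- what changed: Replaces the 2D difference-array / four-corner prefix-sum scheme with a direct per-cell evaluation: for each cell, sum the signed damage of every skill whose rectangle covers it, with no auxiliary grid at all.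
-- outside the precondition, e.g. on solution([[1]], [[-1, 0, 0, 0, 0, 1]]): A returns 0, B returns 1; on solution([[1], [1]], [[2, -1, 0, -1, 0, 1]]): A returns 0, B returns 2
import Mathlib
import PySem

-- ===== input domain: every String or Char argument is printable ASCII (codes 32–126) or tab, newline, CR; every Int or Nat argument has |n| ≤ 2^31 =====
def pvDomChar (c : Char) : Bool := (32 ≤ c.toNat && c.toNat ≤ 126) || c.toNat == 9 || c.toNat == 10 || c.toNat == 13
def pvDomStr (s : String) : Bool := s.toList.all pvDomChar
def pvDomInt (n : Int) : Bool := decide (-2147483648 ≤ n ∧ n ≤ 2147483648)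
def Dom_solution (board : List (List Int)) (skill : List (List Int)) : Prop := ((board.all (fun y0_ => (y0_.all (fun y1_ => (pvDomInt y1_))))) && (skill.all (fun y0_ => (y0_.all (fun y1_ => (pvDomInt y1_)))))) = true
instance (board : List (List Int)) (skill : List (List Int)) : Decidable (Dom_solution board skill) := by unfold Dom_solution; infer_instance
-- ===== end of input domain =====

-- B replaces A's four-corner 2D difference array + two prefix-sum passes by a direct
-- per-cell summation over the skills covering each cell (no auxiliary grid); alternative
-- decomposition, not claimed faster.

-- ===== PORT A =====
-- X[a][b] += v  (Python index semantics: negative wraps, out of range raises — none is a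
-- no-op here, reachable only outside Pre_solution)
def pvAddAt (X : List (List Int)) (a b : Int) (v : Int) : List (List Int) :=
  match PySem.List.pyIdx? X.length a with
  | some i =>
      X.modify i (fun row =>
        match PySem.List.pyIdx? row.length b with
        | some j => row.modify j (· + v)
        | none => row)
  | none => X

-- one iteration of A's skill loop; the wildcard arm (Python: unpacking ValueError) and the
-- .getD 0 on the sign table (Python: IndexError for t outside -1..2) occur only outside Pre_
def pvApplySkill (X : List (List Int)) (s : List Int) : List (List Int) :=
  match s with
  | [t, r1, c1, r2, c2, d] =>
      let v := d * ((PySem.List.pyGet? [(-1 : Int), 1] (t - 1)).getD 0)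
      pvAddAt (pvAddAt (pvAddAt (pvAddAt X r1 c1 v) r1 (c2 + 1) (-v)) (r2 + 1) c1 (-v)) (r2 + 1) (c2 + 1) v
  | _ => X

-- the in-place row pass 'for i in range(1,n+1): X[j][i] += X[j][i-1]'
def pvPrefixRowGo (p : Int) : List Int → List Int
  | [] => []
  | x :: t => (p + x) :: pvPrefixRowGo (p + x) t

def pvPrefixRow : List Int → List Int
  | [] => []
  | h :: t => h :: pvPrefixRowGo h t

-- the in-place column pass 'for j in range(1,m+1): X[j][i] += X[j-1][i]'
def pvPrefixColsGo (p : List Int) : List (List Int) → List (List Int)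
  | [] => []
  | r :: rs => (List.zipWith (· + ·) p r) :: pvPrefixColsGo (List.zipWith (· + ·) p r) rs

def pvPrefixCols : List (List Int) → List (List Int)
  | [] => []
  | h :: t => h :: pvPrefixColsGo h t

def solution (board : List (List Int)) (skill : List (List Int)) : Int :=
  let m := board.length
  let n := (board.getD 0 []).length   -- board[0]: IndexError on empty board, outside Pre_
  let X1 := skill.foldl pvApplySkill (List.replicate (m + 1) (List.replicate (n + 1) (0 : Int)))
  let X2 := X1.map pvPrefixRow
  let X3 := pvPrefixCols X2
  (List.range m).foldl (fun acc x =>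
    (List.range n).foldl (fun a y =>
      a + (if 0 < (board.getD x []).getD y 0 + (X3.getD x []).getD y 0 then 1 else 0)) acc) 0

-- ===== PORT B =====
-- one iteration of B's inner skill loop at cell (x, y)
def pvSkillAdd (x y : Int) (h : Int) (s : List Int) : Int :=
  match s with
  | [t, r1, c1, r2, c2, d] =>
      if r1 ≤ x ∧ x ≤ r2 ∧ c1 ≤ y ∧ y ≤ c2 then h + (if t == 1 then -d else d) else h
  | _ => h

def solution_alt (board : List (List Int)) (skill : List (List Int)) : Int :=
  let m := board.length
  let n := (board.getD 0 []).length
  (List.range m).foldl (fun cnt x =>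
    (List.range n).foldl (fun c y =>
      let h := skill.foldl (pvSkillAdd (Int.ofNat x) (Int.ofNat y)) ((board.getD x []).getD y 0)
      c + (if 0 < h then 1 else 0)) cnt) 0

-- ===== PRECONDITION & SPEC =====
-- Pre_ excludes the inputs where A raises (empty board, a board row shorter than row 0, a
-- skill row of the wrong arity or with coordinates past the difference grid) and malformed
-- skill rows (type outside {1,2} or negative coordinates), on which A's returned value is
-- an artefact of Python negative-index wraparound into the sign table / the grid.
def Pre_solution (board : List (List Int)) (skill : List (List Int)) : Prop :=
  board ≠ [] ∧
  (∀ row ∈ board, (board.getD 0 []).length ≤ row.length) ∧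
  (∀ s ∈ skill, s.length = 6 ∧ (s.getD 0 0 = 1 ∨ s.getD 0 0 = 2) ∧
    0 ≤ s.getD 1 0 ∧ s.getD 1 0 ≤ s.getD 3 0 ∧ s.getD 3 0 < (board.length : Int) ∧
    0 ≤ s.getD 2 0 ∧ s.getD 2 0 ≤ s.getD 4 0 ∧ s.getD 4 0 < ((board.getD 0 []).length : Int))
instance (board : List (List Int)) (skill : List (List Int)) : Decidable (Pre_solution board skill) := by unfold Pre_solution; infer_instance

def pvWitness_solution : List (List Int) × List (List Int) := ([[1, 2], [3, 4]], [[1, 0, 0, 1, 1, 1]])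

def Spec_solution (board : List (List Int)) (skill : List (List Int)) (out : Int) : Prop := out = solution_alt board skill
instance (board : List (List Int)) (skill : List (List Int)) (out : Int) : Decidable (Spec_solution board skill out) := by unfold Spec_solution; infer_instance

-- ===== CLAIM (what is proved, stated in full; the proofs are below) =====
def Claim_equal_solution : Prop := ∀ (board : List (List Int)) (skill : List (List Int)), Dom_solution board skill → Pre_solution board skill → Spec_solution board skill (solution board skill)

-- ===== LEMMAS AND PROOFS =====

-- the cell view of a 2D list
def pvCell (X : List (List Int)) (x y : Nat) : Int := (X.getD x []).getD y 0

-- B's signed contribution of skill s to cell (x, y)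
def pvContrib (x y : Nat) (s : List Int) : Int :=
  match s with
  | [t, r1, c1, r2, c2, d] =>
      if r1 ≤ (x : Int) ∧ (x : Int) ≤ r2 ∧ c1 ≤ (y : Int) ∧ (y : Int) ≤ c2 then (if t == 1 then -d else d) else 0
  | _ => 0

-- A's four-corner contribution of skill s to cell (x, y) of the difference grid
def pvCorner (x y : Nat) (s : List Int) : Int :=
  match s with
  | [t, r1, c1, r2, c2, d] =>
      ((if (x : Int) = r1 then (1 : Int) else 0) - (if (x : Int) = r2 + 1 then 1 else 0)) *
      ((if (y : Int) = c1 then (1 : Int) else 0) - (if (y : Int) = c2 + 1 then 1 else 0)) *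
      (d * ((PySem.List.pyGet? [(-1 : Int), 1] (t - 1)).getD 0))
  | _ => 0

def pvShape (M N : Nat) (X : List (List Int)) : Prop := X.length = M ∧ ∀ r ∈ X, r.length = N

lemma pvGetD_modify {α : Type} (l : List α) (i j : Nat) (f : α → α) (dflt : α) (hj : j < l.length) :
    (l.modify i f).getD j dflt = if i = j then f (l.getD j dflt) else l.getD j dflt := by
  rw [List.getD_eq_getElem?_getD, List.getD_eq_getElem?_getD, List.getElem?_modify,
    List.getElem?_eq_getElem hj]
  by_cases h : i = j <;> simp [h]

lemma pvIdx_eval {n : Nat} {i : Int} (h0 : 0 ≤ i) (h : i < (n : Int)) :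
    PySem.List.pyIdx? n i = some i.toNat := by
  unfold PySem.List.pyIdx?
  split_ifs <;> simp_all <;> omega

lemma pvSkill_shape {s : List Int} (h : s.length = 6) :
    ∃ t r1 c1 r2 c2 d, s = [t, r1, c1, r2, c2, d] := by
  rcases s with _ | ⟨a, _ | ⟨b, _ | ⟨c, _ | ⟨d, _ | ⟨e, _ | ⟨f, _ | ⟨g, s⟩⟩⟩⟩⟩⟩⟩ <;> simp_all

lemma pvSkillAdd_eq (x y : Nat) (h : Int) (s : List Int) :
    pvSkillAdd (Int.ofNat x) (Int.ofNat y) h s = h + pvContrib x y s := by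
  rcases s with _ | ⟨a, _ | ⟨b, _ | ⟨c, _ | ⟨d, _ | ⟨e, _ | ⟨f, _ | ⟨g, s⟩⟩⟩⟩⟩⟩⟩ <;>
    simp only [pvSkillAdd, pvContrib, Int.ofNat_eq_natCast] <;>
    (try split_ifs) <;> ring

lemma pvAddAt_shape {M N : Nat} {X : List (List Int)} (hX : pvShape M N X) (a b v : Int) :
    pvShape M N (pvAddAt X a b v) := by
  obtain ⟨hlen, hrow⟩ := hX
  unfold pvAddAt
  rcases hi : PySem.List.pyIdx? X.length a with _ | i
  · exact ⟨hlen, hrow⟩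
  refine ⟨by simpa using hlen, ?_⟩
  intro r hr
  rw [List.mem_iff_getElem?] at hr
  obtain ⟨j, hj⟩ := hr
  rw [List.getElem?_modify] at hj
  rcases hXj : X[j]? with _ | row
  · rw [hXj] at hj; simp at hj
  · rw [hXj] at hj
    have hrowmem : row ∈ X := List.mem_of_getElem? hXj
    have hrlen := hrow row hrowmem
    simp only [Option.map_eq_map, Option.map_some] at hj
    by_cases hij : i = j
    · simp only [hij, Option.some.injEq] at hj
      subst hj
      rcases hb : PySem.List.pyIdx? row.length b with _ | k
      · exact hrlen
      · simpa using hrlen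
    · simp only [if_neg hij, Option.some.injEq] at hj
      subst hj; exact hrlen

lemma pvAddAt_cell {M N : Nat} {X : List (List Int)} (hX : pvShape M N X)
    {a b : Int} (ha0 : 0 ≤ a) (haM : a < (M : Int)) (hb0 : 0 ≤ b) (hbN : b < (N : Int))
    (v : Int) {x y : Nat} (hx : x < M) (hy : y < N) :
    pvCell (pvAddAt X a b v) x y = pvCell X x y + (if (x : Int) = a ∧ (y : Int) = b then v else 0) := by
  obtain ⟨hlen, hrow⟩ := hX
  have hxlt : x < X.length := by rw [hlen]; exact hx
  have hia : PySem.List.pyIdx? X.length a = some a.toNat := pvIdx_eval ha0 (by rw [hlen]; exact haM)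
  unfold pvAddAt pvCell
  rw [hia]
  rw [pvGetD_modify _ _ _ _ _ hxlt]
  by_cases hax : a.toNat = x
  · have hxa : (x : Int) = a := by omega
    rw [if_pos hax]
    have hrmem : X.getD x [] ∈ X := by
      rw [List.getD_eq_getElem?_getD, List.getElem?_eq_getElem hxlt]
      exact List.getElem_mem hxlt
    have hrl : (X.getD x []).length = N := hrow _ hrmem
    have hib : PySem.List.pyIdx? (X.getD x []).length b = some b.toNat :=
      pvIdx_eval hb0 (by rw [hrl]; exact hbN)
    simp only [hib]
    rw [pvGetD_modify _ _ _ _ _ (by rw [hrl]; exact hy)]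
    by_cases hby : b.toNat = y
    · have hyb : (y : Int) = b := by omega
      rw [if_pos hby, if_pos ⟨hxa, hyb⟩]
    · have : ¬((x : Int) = a ∧ (y : Int) = b) := by
        rintro ⟨-, h2⟩; omega
      rw [if_neg hby, if_neg this, add_zero]
  · have : ¬((x : Int) = a ∧ (y : Int) = b) := by
      rintro ⟨h1, -⟩; omega
    rw [if_neg hax, if_neg this, add_zero]

lemma pvIte_and (P Q : Prop) [Decidable P] [Decidable Q] (v : Int) :
    (if P ∧ Q then v else 0) = (if P then (1 : Int) else 0) * ((if Q then (1 : Int) else 0) * v) := by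
  by_cases hP : P <;> by_cases hQ : Q <;> simp [hP, hQ]

lemma pvIte_chain (A B C D : Prop) [Decidable A] [Decidable B] [Decidable C] [Decidable D] (v : Int) :
    (if A ∧ B ∧ C ∧ D then v else 0) =
      (if A then (1 : Int) else 0) * ((if B then (1 : Int) else 0) *
        ((if C then (1 : Int) else 0) * ((if D then (1 : Int) else 0) * v))) := by
  by_cases hA : A <;> by_cases hB : B <;> by_cases hC : C <;> by_cases hD : D <;>
    simp [hA, hB, hC, hD]

lemma pvApply_cell {m n : Nat} {X : List (List Int)} (hX : pvShape (m + 1) (n + 1) X)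
    {s : List Int}
    (hs : s.length = 6 ∧ (s.getD 0 0 = 1 ∨ s.getD 0 0 = 2) ∧
      0 ≤ s.getD 1 0 ∧ s.getD 1 0 ≤ s.getD 3 0 ∧ s.getD 3 0 < (m : Int) ∧
      0 ≤ s.getD 2 0 ∧ s.getD 2 0 ≤ s.getD 4 0 ∧ s.getD 4 0 < (n : Int))
    {x y : Nat} (hx : x < m + 1) (hy : y < n + 1) :
    pvCell (pvApplySkill X s) x y = pvCell X x y + pvCorner x y s ∧
    pvShape (m + 1) (n + 1) (pvApplySkill X s) := by
  obtain ⟨t, r1, c1, r2, c2, d, rfl⟩ := pvSkill_shape hs.1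
  simp only [List.getD_cons_zero, List.getD_cons_succ] at hs
  obtain ⟨-, ht, hr1, hr12, hr2, hc1, hc12, hc2⟩ := hs
  simp only [pvApplySkill]
  set V := d * ((PySem.List.pyGet? [(-1 : Int), 1] (t - 1)).getD 0) with hV
  have s1 := pvAddAt_shape hX r1 c1 V
  have s2 := pvAddAt_shape s1 r1 (c2 + 1) (-V)
  have s3 := pvAddAt_shape s2 (r2 + 1) c1 (-V)
  have s4 := pvAddAt_shape s3 (r2 + 1) (c2 + 1) V
  refine ⟨?_, s4⟩
  have br1 : r1 < ((m + 1 : Nat) : Int) := by push_cast; omega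
  have br2 : r2 + 1 < ((m + 1 : Nat) : Int) := by push_cast; omega
  have bc1 : c1 < ((n + 1 : Nat) : Int) := by push_cast; omega
  have bc2 : c2 + 1 < ((n + 1 : Nat) : Int) := by push_cast; omega
  rw [pvAddAt_cell s3 (by omega) br2 (by omega) bc2 _ hx hy,
    pvAddAt_cell s2 (by omega) br2 (by omega) bc1 _ hx hy,
    pvAddAt_cell s1 (by omega) br1 (by omega) bc2 _ hx hy,
    pvAddAt_cell hX (by omega) br1 (by omega) bc1 _ hx hy]
  simp only [pvCorner]
  rw [pvIte_and, pvIte_and, pvIte_and, pvIte_and]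
  ring

lemma pvFoldl_cell {m n : Nat} (skill : List (List Int))
    (hsk : ∀ s ∈ skill, s.length = 6 ∧ (s.getD 0 0 = 1 ∨ s.getD 0 0 = 2) ∧
      0 ≤ s.getD 1 0 ∧ s.getD 1 0 ≤ s.getD 3 0 ∧ s.getD 3 0 < (m : Int) ∧
      0 ≤ s.getD 2 0 ∧ s.getD 2 0 ≤ s.getD 4 0 ∧ s.getD 4 0 < (n : Int))
    {X : List (List Int)} (hX : pvShape (m + 1) (n + 1) X)
    {x y : Nat} (hx : x < m + 1) (hy : y < n + 1) :
    pvCell (skill.foldl pvApplySkill X) x y = pvCell X x y + (skill.map (pvCorner x y)).sum ∧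
    pvShape (m + 1) (n + 1) (skill.foldl pvApplySkill X) := by
  induction skill generalizing X with
  | nil => exact ⟨by simp, hX⟩
  | cons s rest ih =>
    have hs := hsk s List.mem_cons_self
    have happ := pvApply_cell hX hs hx hy
    have hrest := ih (fun s' hs' => hsk s' (List.mem_cons_of_mem _ hs')) happ.2
    refine ⟨?_, hrest.2⟩
    simp only [List.foldl_cons, List.map_cons, List.sum_cons]
    rw [hrest.1, happ.1]
    ring

lemma pvPrefixRowGo_length (r : List Int) (p : Int) : (pvPrefixRowGo p r).length = r.length := by
  induction r generalizing p with
  | nil => rfl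
  | cons x t ih => simp [pvPrefixRowGo, ih]

lemma pvPrefixRow_length (r : List Int) : (pvPrefixRow r).length = r.length := by
  cases r with
  | nil => rfl
  | cons x t => simp [pvPrefixRow, pvPrefixRowGo_length]

lemma pvPrefixRow_getD {r : List Int} {y : Nat} (hy : y < r.length) :
    (pvPrefixRow r).getD y 0 = ∑ i ∈ Finset.range (y + 1), r.getD i 0 := by
  have go : ∀ (t : List Int) (p : Int) (k : Nat), k < t.length →
      (pvPrefixRowGo p t).getD k 0 = p + ∑ i ∈ Finset.range (k + 1), t.getD i 0 := by
    intro t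
    induction t with
    | nil => intro p k hk; simp at hk
    | cons x t ih =>
      intro p k hk
      cases k with
      | zero => simp [pvPrefixRowGo]
      | succ k =>
        have hk' : k < t.length := by simpa using hk
        simp only [pvPrefixRowGo, List.getD_cons_succ]
        rw [ih (p + x) k hk']
        conv_rhs => rw [Finset.sum_range_succ']
        simp only [List.getD_cons_succ, List.getD_cons_zero]
        ring
  cases r with
  | nil => simp at hy
  | cons x t =>
    cases y with
    | zero => simp [pvPrefixRow]
    | succ y =>
      have hy' : y < t.length := by simpa using hy
      simp only [pvPrefixRow, List.getD_cons_succ]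
      rw [go t x y hy']
      conv_rhs => rw [Finset.sum_range_succ']
      simp only [List.getD_cons_succ, List.getD_cons_zero]
      ring

lemma pvPrefixCols_cell {N : Nat} {X : List (List Int)} (hrow : ∀ r ∈ X, r.length = N)
    {x y : Nat} (hx : x < X.length) (hy : y < N) :
    pvCell (pvPrefixCols X) x y = ∑ j ∈ Finset.range (x + 1), pvCell X j y := by
  have hzip : ∀ (p r : List Int), y < p.length → y < r.length →
      (List.zipWith (· + ·) p r).getD y 0 = p.getD y 0 + r.getD y 0 := by
    intro p r hp hr
    have hl : y < (List.zipWith (· + ·) p r).length := by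
      rw [List.length_zipWith]; omega
    rw [List.getD_eq_getElem _ _ hl, List.getD_eq_getElem _ _ hp, List.getD_eq_getElem _ _ hr,
      List.getElem_zipWith]
  have go : ∀ (rs : List (List Int)) (p : List Int) (k : Nat), k < rs.length →
      p.length = N → (∀ r ∈ rs, r.length = N) →
      ((pvPrefixColsGo p rs).getD k []).getD y 0 =
        p.getD y 0 + ∑ j ∈ Finset.range (k + 1), pvCell rs j y := by
    intro rs
    induction rs with
    | nil => intro p k hk; simp at hk
    | cons r rs ih =>
      intro p k hk hp hr
      have hrN : r.length = N := hr r List.mem_cons_self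
      have hzN : (List.zipWith (· + ·) p r).length = N := by
        rw [List.length_zipWith]; omega
      cases k with
      | zero =>
        simp only [pvPrefixColsGo, List.getD_cons_zero]
        rw [hzip p r (by omega) (by omega)]
        simp [pvCell]
      | succ k =>
        have hk' : k < rs.length := by simpa using hk
        simp only [pvPrefixColsGo, List.getD_cons_succ]
        rw [ih (List.zipWith (· + ·) p r) k hk' hzN (fun r' hr' => hr r' (List.mem_cons_of_mem _ hr')),
          hzip p r (by omega) (by omega)]
        conv_rhs => rw [Finset.sum_range_succ']
        simp only [pvCell, List.getD_cons_succ, List.getD_cons_zero]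
        ring
  cases X with
  | nil => simp at hx
  | cons r rs =>
    cases x with
    | zero => simp [pvPrefixCols, pvCell]
    | succ x =>
      have hx' : x < rs.length := by simpa using hx
      have hrN : r.length = N := hrow r List.mem_cons_self
      simp only [pvPrefixCols, pvCell, List.getD_cons_succ]
      rw [go rs r x hx' hrN (fun r' hr' => hrow r' (List.mem_cons_of_mem _ hr'))]
      conv_rhs => rw [Finset.sum_range_succ']
      simp only [pvCell, List.getD_cons_succ, List.getD_cons_zero]
      ring

lemma pvSum_indicator (N : Nat) (a : Int) (ha : 0 ≤ a) :
    (∑ i ∈ Finset.range N, (if (i : Int) = a then (1 : Int) else 0)) =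
      (if a < (N : Int) then 1 else 0) := by
  induction N with
  | zero => simp; omega
  | succ N ih =>
    rw [Finset.sum_range_succ, ih]
    split_ifs <;> omega

lemma pvSum_sum_corner {m n : Nat} {s : List Int}
    (hs : s.length = 6 ∧ (s.getD 0 0 = 1 ∨ s.getD 0 0 = 2) ∧
      0 ≤ s.getD 1 0 ∧ s.getD 1 0 ≤ s.getD 3 0 ∧ s.getD 3 0 < (m : Int) ∧
      0 ≤ s.getD 2 0 ∧ s.getD 2 0 ≤ s.getD 4 0 ∧ s.getD 4 0 < (n : Int))
    {x y : Nat} :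
    (∑ i ∈ Finset.range (x + 1), ∑ j ∈ Finset.range (y + 1), pvCorner i j s) = pvContrib x y s := by
  obtain ⟨t, r1, c1, r2, c2, d, rfl⟩ := pvSkill_shape hs.1
  obtain ⟨-, ht, hr1, hr12, hr2, hc1, hc12, hc2⟩ := by
    simpa only [List.getD_cons_zero, List.getD_cons_succ] using hs
  simp only [pvCorner, pvContrib]
  set V := d * ((PySem.List.pyGet? [(-1 : Int), 1] (t - 1)).getD 0) with hV
  have step : ∀ i : Nat,
      (∑ j ∈ Finset.range (y + 1),
        ((if (i : Int) = r1 then (1 : Int) else 0) - (if (i : Int) = r2 + 1 then 1 else 0)) *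
        ((if (j : Int) = c1 then (1 : Int) else 0) - (if (j : Int) = c2 + 1 then 1 else 0)) * V) =
      ((if (i : Int) = r1 then (1 : Int) else 0) - (if (i : Int) = r2 + 1 then 1 else 0)) *
        (((if c1 ≤ (y : Int) then (1 : Int) else 0) - (if c2 + 1 ≤ (y : Int) then 1 else 0)) * V) := by
    intro i
    simp only [mul_assoc]
    rw [← Finset.mul_sum, ← Finset.sum_mul, Finset.sum_sub_distrib,
      pvSum_indicator _ _ hc1, pvSum_indicator _ _ (by omega : (0 : Int) ≤ c2 + 1)]
    have e1 : (c1 < ((y + 1 : Nat) : Int)) ↔ c1 ≤ (y : Int) := by push_cast; omega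
    have e2 : (c2 + 1 < ((y + 1 : Nat) : Int)) ↔ c2 + 1 ≤ (y : Int) := by push_cast; omega
    simp only [e1, e2]
  rw [Finset.sum_congr rfl (fun i _ => step i), ← Finset.sum_mul, Finset.sum_sub_distrib,
    pvSum_indicator _ _ hr1, pvSum_indicator _ _ (by omega : (0 : Int) ≤ r2 + 1)]
  have e1 : (r1 < ((x + 1 : Nat) : Int)) ↔ r1 ≤ (x : Int) := by push_cast; omega
  have e2 : (r2 + 1 < ((x + 1 : Nat) : Int)) ↔ r2 + 1 ≤ (x : Int) := by push_cast; omega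
  simp only [e1, e2]
  have hVval : V = if t == 1 then -d else d := by
    rcases ht with rfl | rfl
    · rw [hV, show (PySem.List.pyGet? [(-1 : Int), 1] (1 - 1)).getD 0 = -1 from by decide]
      norm_num
    · rw [hV, show (PySem.List.pyGet? [(-1 : Int), 1] (2 - 1)).getD 0 = 1 from by decide]
      norm_num
  rw [hVval, pvIte_chain]
  split_ifs <;> first | ring1 | omega

lemma pvSum_comm_list {α : Type} (F : Finset α) (l : List (List Int)) (g : α → List Int → Int) :
    (∑ i ∈ F, (l.map (g i)).sum) = (l.map (fun s => ∑ i ∈ F, g i s)).sum := by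
  induction l with
  | nil => simp
  | cons s l ih => simp [List.map_cons, List.sum_cons, Finset.sum_add_distrib, ih]

lemma pvGetD_map (f : List Int → List Int) (l : List (List Int)) {j : Nat} (hj : j < l.length) :
    (l.map f).getD j [] = f (l.getD j []) := by
  rw [List.getD_eq_getElem?_getD, List.getD_eq_getElem?_getD, List.getElem?_map,
    List.getElem?_eq_getElem hj]
  simp

lemma pvCell_final (board skill : List (List Int))
    (hsk : ∀ s ∈ skill, s.length = 6 ∧ (s.getD 0 0 = 1 ∨ s.getD 0 0 = 2) ∧
      0 ≤ s.getD 1 0 ∧ s.getD 1 0 ≤ s.getD 3 0 ∧ s.getD 3 0 < (board.length : Int) ∧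
      0 ≤ s.getD 2 0 ∧ s.getD 2 0 ≤ s.getD 4 0 ∧ s.getD 4 0 < (((board.getD 0 []).length : Nat) : Int))
    {x y : Nat} (hx : x < board.length) (hy : y < (board.getD 0 []).length) :
    pvCell (pvPrefixCols ((skill.foldl pvApplySkill
        (List.replicate (board.length + 1) (List.replicate ((board.getD 0 []).length + 1) (0 : Int)))).map pvPrefixRow)) x y =
      (skill.map (pvContrib x y)).sum := by
  set m := board.length with hm
  set n := (board.getD 0 []).length with hn
  set X0 := List.replicate (m + 1) (List.replicate (n + 1) (0 : Int)) with hX0def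
  have hX0 : pvShape (m + 1) (n + 1) X0 := by
    constructor
    · simp [hX0def]
    · intro r hr
      rw [List.eq_of_mem_replicate hr]
      simp
  have hX0cell : ∀ j i : Nat, pvCell X0 j i = 0 := by
    intro j i
    simp only [pvCell, hX0def, List.getD_eq_getElem?_getD, List.getElem?_replicate]
    split_ifs <;> simp [List.getElem?_replicate] <;> split_ifs <;> simp
  set X1 := skill.foldl pvApplySkill X0 with hX1def
  have hX1shape : pvShape (m + 1) (n + 1) X1 :=
    (pvFoldl_cell skill hsk hX0 (Nat.succ_pos m) (Nat.succ_pos n)).2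
  have hX1cell : ∀ j i : Nat, j < m + 1 → i < n + 1 →
      pvCell X1 j i = (skill.map (pvCorner j i)).sum := by
    intro j i hj hi
    rw [(pvFoldl_cell skill hsk hX0 hj hi).1, hX0cell]
    ring
  set X2 := X1.map pvPrefixRow with hX2def
  have hX2len : X2.length = m + 1 := by simp [hX2def, hX1shape.1]
  have hX2row : ∀ r ∈ X2, r.length = n + 1 := by
    intro r hr
    obtain ⟨r', hr', rfl⟩ := List.mem_map.mp hr
    rw [pvPrefixRow_length]
    exact hX1shape.2 r' hr'
  have hX2cell : ∀ j : Nat, j < m + 1 →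
      pvCell X2 j y = ∑ i ∈ Finset.range (y + 1), pvCell X1 j i := by
    intro j hj
    have hj1 : j < X1.length := by rw [hX1shape.1]; exact hj
    have hrl : (X1.getD j []).length = n + 1 := by
      apply hX1shape.2
      rw [List.getD_eq_getElem?_getD, List.getElem?_eq_getElem hj1]
      exact List.getElem_mem hj1
    simp only [pvCell, hX2def]
    rw [pvGetD_map _ _ hj1, pvPrefixRow_getD (by omega : y < (X1.getD j []).length)]
  rw [pvPrefixCols_cell hX2row (by omega : x < X2.length) (by omega : y < n + 1)]
  have hstep : ∀ j ∈ Finset.range (x + 1),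
      pvCell X2 j y = (skill.map (fun s => ∑ i ∈ Finset.range (y + 1), pvCorner j i s)).sum := by
    intro j hj
    have hjm : j < m + 1 := by have := Finset.mem_range.mp hj; omega
    rw [hX2cell j hjm]
    rw [Finset.sum_congr rfl (fun i hi => hX1cell j i hjm (by have := Finset.mem_range.mp hi; omega))]
    exact pvSum_comm_list _ skill (fun i s => pvCorner j i s)
  rw [Finset.sum_congr rfl hstep, pvSum_comm_list _ skill
    (fun j s => ∑ i ∈ Finset.range (y + 1), pvCorner j i s)]
  exact congrArg List.sum (List.map_congr_left (fun s hs => pvSum_sum_corner (m := m) (n := n) (hsk s hs)))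

-- ===== VERDICT (by name: the statement is the Claim_ definition above) =====
theorem solution_spec : Claim_equal_solution := by
  intro board skill hdom hpre
  obtain ⟨hne, hrows, hsk⟩ := hpre
  unfold Spec_solution
  simp only [solution, solution_alt]
  apply PySem.List.foldl_congr_mem
  intro acc x hxmem
  apply PySem.List.foldl_congr_mem
  intro a y hymem
  have hx : x < board.length := List.mem_range.mp hxmem
  have hy : y < (board.getD 0 []).length := List.mem_range.mp hymem
  have hB : skill.foldl (pvSkillAdd (Int.ofNat x) (Int.ofNat y)) ((board.getD x []).getD y 0) =
      (board.getD x []).getD y 0 + (skill.map (pvContrib x y)).sum := by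
    rw [PySem.List.foldl_congr_mem skill _ (fun acc s => acc + pvContrib x y s) _
      (fun acc s _ => pvSkillAdd_eq x y acc s)]
    exact PySem.List.foldl_add skill (pvContrib x y) _
  rw [hB]
  have hA := pvCell_final board skill hsk hx hy
  simp only [pvCell] at hA
  rw [hA]
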